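-- pv_equiv track=rewrite | github.com/CoderRahul007/DSA | striver/Implementation/Compare Version Numbers.py | removeZerosFromEnd
-- ===== SOURCE A (Python) =====
-- def removeZerosFromEnd(a):
--
--     # First initialising answer as complete string then removing zeros from end
--     p = len(a) - 1
--
--     # Traversing the string backwards
--     for i in range(len(a) - 1, 0, -2):
--
--         # Checking if the current character is 0 and there is dot to the left of it
--         # If yes, then decreasing length of desired string
--         if (a[i] == '0'  and a[i - 1] == '.'):
--             p -= 2
--
--         #Otherwise ending the loop
--         else:
--             break
--
--     # Returning the final string
--     return a[0 : p + 1]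
-- ===== SOURCE B (Python) =====
-- def removeZerosFromEnd(a):
--     # Repeatedly strip a trailing ".0" pair until none remains.
--     while a.endswith('.0'):
--         a = a[:-2]
--     return a
-- ===== Notes on version B (the rewrite author's own statement) =====
-- stated objective: idiomatic
-- what changed: Replaces A's backward index walk computing a cut position p over range(len-1,0,-2) with a direct while loop that repeatedly strips a trailing '.0' via endswith and slicing.
import Mathlib
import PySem

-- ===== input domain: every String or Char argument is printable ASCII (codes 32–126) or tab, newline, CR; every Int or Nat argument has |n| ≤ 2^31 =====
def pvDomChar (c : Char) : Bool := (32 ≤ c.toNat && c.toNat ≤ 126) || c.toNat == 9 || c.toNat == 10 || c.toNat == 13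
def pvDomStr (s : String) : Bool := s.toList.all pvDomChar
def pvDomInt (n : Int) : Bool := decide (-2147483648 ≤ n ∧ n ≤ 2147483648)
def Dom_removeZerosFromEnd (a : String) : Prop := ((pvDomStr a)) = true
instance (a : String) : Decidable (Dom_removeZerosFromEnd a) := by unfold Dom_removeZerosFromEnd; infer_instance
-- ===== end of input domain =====

-- B replaces A's backward index walk (computing a cut position p over range(len-1,0,-2))
-- with a while loop that repeatedly strips a trailing ".0" via endswith and slicing (objective: idiomatic).

-- ===== PORT A =====
-- for i in range(len(a)-1, 0, -2): if a[i]=='0' and a[i-1]=='.': p -= 2 else: break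
def removeZerosFromEndLoop (cs : List Char) : List Int → Int → Int
  | [], p => p
  | i :: rest, p =>
    if PySem.List.pyGet? cs i = some '0' ∧ PySem.List.pyGet? cs (i - 1) = some '.' then
      removeZerosFromEndLoop cs rest (p - 2)
    else p

def removeZerosFromEnd (a : String) : String :=
  let cs := a.toList
  let p : Int := (cs.length : Int) - 1
  let p := removeZerosFromEndLoop cs (PySem.List.pyRange ((cs.length : Int) - 1) 0 (-2)) p
  String.ofList (PySem.Chars.slice cs (some 0) (some (p + 1)))   -- return a[0 : p + 1]

-- ===== PORT B =====
-- needed by stripTail's termination proof: the stripped list is strictly shorter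
theorem stripTail_dec (cs : List Char) (h : PySem.Chars.endswith cs ['.', '0'] = true) :
    (PySem.Chars.slice cs none (some (-2))).length < cs.length := by
  have hsuf : ['.', '0'] <:+ cs := (PySem.Chars.endswith_iff cs _).mp h
  have hlen : 2 ≤ cs.length := hsuf.length_le
  rw [PySem.Chars.slice, PySem.List.slice_to_neg_ofNat cs 2 (by omega)]
  simp [List.length_take]; omega

-- while a.endswith('.0'): a = a[:-2]
def stripTail (cs : List Char) : List Char :=
  if h : PySem.Chars.endswith cs ['.', '0'] = true then
    stripTail (PySem.Chars.slice cs none (some (-2)))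
  else cs
termination_by cs.length
decreasing_by exact stripTail_dec cs h

def removeZerosFromEnd_alt (a : String) : String :=
  String.ofList (stripTail a.toList)

-- ===== PRECONDITION & SPEC =====
def Spec_removeZerosFromEnd (a : String) (out : String) : Prop := out = removeZerosFromEnd_alt a
instance (a : String) (out : String) : Decidable (Spec_removeZerosFromEnd a out) := by unfold Spec_removeZerosFromEnd; infer_instance

-- ===== CLAIM (what is proved, stated in full; the proofs are below) =====
def Claim_equal_removeZerosFromEnd : Prop := ∀ (a : String), Dom_removeZerosFromEnd a → Spec_removeZerosFromEnd a (removeZerosFromEnd a)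

-- ===== LEMMAS AND PROOFS =====

theorem pyRange_neg_two_nil (a : Int) (h : a ≤ 0) : PySem.List.pyRange a 0 (-2) = [] := by
  unfold PySem.List.pyRange
  simp only [if_neg (by norm_num : ¬ ((-2:Int) = 0))]
  norm_num
  omega

theorem pyRange_neg_two_cons (a : Int) (h : 0 < a) :
    PySem.List.pyRange a 0 (-2) = a :: PySem.List.pyRange (a - 2) 0 (-2) := by
  unfold PySem.List.pyRange
  simp only [if_neg (by norm_num : ¬ ((-2:Int) = 0))]
  norm_num
  rw [if_pos h]
  have hcnt : ((a + 2 - 1) / 2).toNat = (if 2 < a then ((a - 1) / 2).toNat else 0) + 1 := by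
    split_ifs with h2 <;> omega
  rw [hcnt, List.range_succ_eq_map]
  simp only [List.map_cons, List.map_map]
  refine List.cons_eq_cons.mpr ⟨by omega, ?_⟩
  apply List.map_congr_left; intro k _
  simp only [Function.comp_apply]
  push_cast; ring

theorem mem_pyRange_neg_two (a i : Int) (h : i ∈ PySem.List.pyRange a 0 (-2)) :
    0 < i ∧ i ≤ a := by
  by_cases ha : 0 < a
  · rw [pyRange_neg_two_cons a ha] at h
    rcases List.mem_cons.mp h with rfl | h'
    · exact ⟨ha, le_refl _⟩
    · have := mem_pyRange_neg_two (a - 2) i h'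
      omega
  · rw [pyRange_neg_two_nil a (by omega)] at h
    simp at h
termination_by a.toNat
decreasing_by omega

theorem loopA_bounds (cs : List Char) (p : Int) (hp : -1 ≤ p) :
    -1 ≤ removeZerosFromEndLoop cs (PySem.List.pyRange p 0 (-2)) p ∧
      removeZerosFromEndLoop cs (PySem.List.pyRange p 0 (-2)) p ≤ p := by
  by_cases h : 0 < p
  · rw [pyRange_neg_two_cons p h]
    rw [removeZerosFromEndLoop]
    split_ifs with hc
    · have := loopA_bounds cs (p - 2) (by omega)
      omega
    · omega
  · rw [pyRange_neg_two_nil p (by omega), removeZerosFromEndLoop]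
    omega
termination_by p.toNat
decreasing_by omega

theorem loopA_congr_append (cs ext : List Char) (r : List Int)
    (h : ∀ i ∈ r, 0 < i ∧ i < cs.length) (p : Int) :
    removeZerosFromEndLoop (cs ++ ext) r p = removeZerosFromEndLoop cs r p := by
  induction r generalizing p with
  | nil => rfl
  | cons i rest ih =>
    obtain ⟨h1, h2⟩ := h i (List.mem_cons_self ..)
    have g1 : PySem.List.pyGet? (cs ++ ext) i = PySem.List.pyGet? cs i := by
      rw [PySem.List.pyGet?_of_nonneg _ (by omega), PySem.List.pyGet?_of_nonneg _ (by omega),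
        List.getElem?_append_left (by omega)]
    have g2 : PySem.List.pyGet? (cs ++ ext) (i - 1) = PySem.List.pyGet? cs (i - 1) := by
      rw [PySem.List.pyGet?_of_nonneg _ (by omega), PySem.List.pyGet?_of_nonneg _ (by omega),
        List.getElem?_append_left (by omega)]
    rw [removeZerosFromEndLoop, removeZerosFromEndLoop, g1, g2]
    split_ifs with hc
    · exact ih (fun j hj => h j (List.mem_cons_of_mem _ hj)) (p - 2)
    · rfl

theorem main_list (cs : List Char) :
    PySem.Chars.slice cs (some 0)
      (some (removeZerosFromEndLoop cs (PySem.List.pyRange ((cs.length : Int) - 1) 0 (-2))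
        ((cs.length : Int) - 1) + 1)) = stripTail cs := by
  by_cases h : PySem.Chars.endswith cs ['.', '0'] = true
  · obtain ⟨xs, rfl⟩ : ∃ xs, cs = xs ++ ['.', '0'] := by
      obtain ⟨t, ht⟩ := (PySem.Chars.endswith_iff cs _).mp h
      exact ⟨t, ht.symm⟩
    rw [stripTail, dif_pos h]
    simp only [PySem.Chars.slice]
    rw [PySem.List.slice_to_neg_ofNat _ 2 (by omega)]
    have htake : (xs ++ ['.', '0']).take ((xs ++ ['.', '0']).length - 2) = xs := by
      simp
    rw [htake]
    have hn : ((xs ++ ['.', '0']).length : Int) - 1 = (xs.length : Int) + 1 := by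
      simp; ring
    rw [hn, pyRange_neg_two_cons _ (by positivity), removeZerosFromEndLoop]
    have g1 : PySem.List.pyGet? (xs ++ ['.', '0']) ((xs.length : Int) + 1) = some '0' := by
      have := PySem.List.pyGet?_append_right xs ['.', '0'] 1
      simpa using this
    have g2 : PySem.List.pyGet? (xs ++ ['.', '0']) ((xs.length : Int) + 1 - 1) = some '.' := by
      have := PySem.List.pyGet?_append_length xs ['0'] '.'
      simp only [show ((xs.length : Int) + 1 - 1) = (xs.length : Int) by ring]
      exact this
    rw [if_pos ⟨g1, g2⟩]
    have hm : ∀ i ∈ PySem.List.pyRange ((xs.length : Int) + 1 - 2) 0 (-2),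
        0 < i ∧ i < (xs.length : Int) := by
      intro i hi
      have := mem_pyRange_neg_two _ i hi
      omega
    rw [loopA_congr_append xs ['.', '0'] _ hm]
    have heq : (xs.length : Int) + 1 - 2 = (xs.length : Int) - 1 := by ring
    rw [heq]
    set q := removeZerosFromEndLoop xs (PySem.List.pyRange ((xs.length : Int) - 1) 0 (-2))
      ((xs.length : Int) - 1) with hq
    have hb := loopA_bounds xs ((xs.length : Int) - 1) (by omega)
    rw [← hq] at hb
    rw [← main_list xs, ← hq]
    simp only [PySem.Chars.slice]
    rw [PySem.List.slice_zero_start, PySem.List.slice_zero_start,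
      PySem.List.slice_to _ (show (0:Int) ≤ q + 1 by omega),
      PySem.List.slice_to _ (show (0:Int) ≤ q + 1 by omega),
      List.take_append_of_le_length (by omega)]
  · rw [stripTail, dif_neg h]
    by_cases h1 : cs.length ≤ 1
    · rw [pyRange_neg_two_nil _ (by omega), removeZerosFromEndLoop]
      simp only [PySem.Chars.slice]
      rw [PySem.List.slice_zero_start,
        PySem.List.slice_to cs (show (0:Int) ≤ (cs.length:Int) - 1 + 1 by omega)]
      have : ((cs.length : Int) - 1 + 1).toNat = cs.length := by omega
      rw [this, List.take_length]
    · rw [pyRange_neg_two_cons _ (by omega), removeZerosFromEndLoop]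
      rw [if_neg ?hc]
      · simp only [PySem.Chars.slice]
        rw [PySem.List.slice_zero_start,
          PySem.List.slice_to cs (show (0:Int) ≤ (cs.length:Int) - 1 + 1 by omega)]
        have : ((cs.length : Int) - 1 + 1).toNat = cs.length := by omega
        rw [this, List.take_length]
      case hc =>
        rintro ⟨c1, c2⟩
        apply h
        rw [PySem.Chars.endswith_iff]
        have e1 : cs[cs.length - 1]'(by omega) = '0' := by
          rw [PySem.List.pyGet?_of_nonneg _ (by omega)] at c1
          have : ((cs.length : Int) - 1).toNat = cs.length - 1 := by omega
          rw [this] at c1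
          simpa [List.getElem?_eq_getElem (by omega : cs.length - 1 < cs.length)] using c1
        have e2 : cs[cs.length - 2]'(by omega) = '.' := by
          rw [PySem.List.pyGet?_of_nonneg _ (by omega)] at c2
          have : ((cs.length : Int) - 1 - 1).toNat = cs.length - 2 := by omega
          rw [this] at c2
          simpa [List.getElem?_eq_getElem (by omega : cs.length - 2 < cs.length)] using c2
        refine ⟨cs.take (cs.length - 2), ?_⟩
        have hdrop : cs.drop (cs.length - 2) = ['.', '0'] := by
          apply List.ext_getElem
          · simp; omega
          · intro i hi1 hi2
            rw [List.getElem_drop]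
            have hi : i < 2 := by simpa using hi2
            interval_cases i
            · simpa [show cs.length - 2 + 0 = cs.length - 2 by omega] using e2
            · simpa [show cs.length - 2 + 1 = cs.length - 1 by omega] using e1
        rw [← hdrop, List.take_append_drop]
termination_by cs.length
decreasing_by simp_all

-- ===== VERDICT (by name: the statement is the Claim_ definition above) =====
theorem removeZerosFromEnd_spec : Claim_equal_removeZerosFromEnd := by
  intro a _
  unfold Spec_removeZerosFromEnd removeZerosFromEnd removeZerosFromEnd_alt
  simp only []
  rw [main_list]
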